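-- pv_equiv track=rewrite | github.com/1a2a222/leetcode | 二维数组的查找.py | Find
-- ===== SOURCE A (Python) =====
-- def Find(alist,target):
--     if alist==[]:
--         return
--     rawnum = len(alist)
--     colnum = len(alist[0])
--     i = 0
--     j = colnum -1
--     count =0
--     while i<rawnum and j>=0:
--         if alist[i][j]<target:
--             i +=1
--         elif alist[i][j]>target:
--             j -=1
--         else:
--             count+=1
--             j-=1
--     return count
-- ===== SOURCE B (Python) =====
-- def Find(alist, target):
--     # Index-free reformulation: view the matrix at the width of its first row,
--     # then repeatedly inspect the last element of the top row of a shrinking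
--     # submatrix, discarding either the top row or the last column.
--     if alist == []:
--         return
--     m = [row[:len(alist[0])] for row in alist]
--     count = 0
--     while m and m[0]:
--         v = m[0][-1]
--         if v < target:
--             m = m[1:]
--         else:
--             if v == target:
--                 count += 1
--             m = [row[:-1] for row in m]
--     return count
-- ===== Notes on version B (the rewrite author's own statement) =====
-- stated objective: alternative
-- what changed: A walks explicit indices (i,j) over the fixed matrix with a three-way comparison; B keeps no indices at all: it views the matrix at the first row's width and then shrinks a submatrix by slicing, inspecting the last element of the top row and discarding either the top row or the last column of every remaining row.
-- outside the precondition, e.g. on Find([[0, 2, 1, 2], [1, -2]], 1): A returns 2, B returns 1; on Find([[1, 3], [9]], 9): A raises IndexError, B returns 1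
import Mathlib
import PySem

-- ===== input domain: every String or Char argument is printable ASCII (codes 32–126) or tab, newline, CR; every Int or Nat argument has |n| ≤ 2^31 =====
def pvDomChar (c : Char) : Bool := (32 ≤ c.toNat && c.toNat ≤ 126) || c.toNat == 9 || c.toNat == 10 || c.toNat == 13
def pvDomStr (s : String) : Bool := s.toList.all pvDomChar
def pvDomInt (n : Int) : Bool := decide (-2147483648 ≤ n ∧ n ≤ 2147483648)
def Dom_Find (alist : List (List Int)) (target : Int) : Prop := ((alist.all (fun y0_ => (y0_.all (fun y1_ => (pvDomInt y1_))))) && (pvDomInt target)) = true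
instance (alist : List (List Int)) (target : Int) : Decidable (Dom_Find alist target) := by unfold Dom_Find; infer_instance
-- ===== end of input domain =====

-- B replaces A's (i,j) index walk by an index-free shrinking submatrix (slice off top row / last column) — objective: alternative decomposition, not faster.


-- ===== PORT A =====
-- the while loop of A: state (i, j, count); alist[i][j] via pyGet? (none = IndexError)
def FindAux (alist : List (List Int)) (target rawnum i j count : Int) : Option Int :=
  if h : i < rawnum ∧ 0 ≤ j then
    match (PySem.List.pyGet? alist i).bind (fun row => PySem.List.pyGet? row j) with
    | none => none
    | some v =>
      if v < target then FindAux alist target rawnum (i + 1) j count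
      else if v > target then FindAux alist target rawnum i (j - 1) count
      else FindAux alist target rawnum i (j - 1) (count + 1)
  else some count
termination_by ((rawnum - i).toNat + (j + 1).toNat)
decreasing_by all_goals omega

def Find (alist : List (List Int)) (target : Int) : Option Int :=
  if alist = [] then none
  else
    let rawnum : Int := alist.length
    let colnum : Int := alist.headI.length
    FindAux alist target rawnum 0 (colnum - 1) 0

-- ===== PORT B =====
-- B's while loop: state is the shrinking submatrix m and count; 'while m and m[0]'
-- is the two guards; m[0][-1] is the last element of the (nonempty) top row;
-- m = m[1:] drops the top row, m = [row[:-1] for row in m] drops the last column.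
def FindAltGo (m : List (List Int)) (target count : Int) : Int :=
  match m with
  | [] => count
  | row :: rest =>
    if hr : row = [] then count
    else
      let v := row.getLast hr          -- m[0][-1], in range since row ≠ []
      if v < target then FindAltGo rest target count
      else FindAltGo ((row :: rest).map List.dropLast) target
        (count + if v = target then 1 else 0)
termination_by (m.length, m.headI.length)
decreasing_by
  · exact Prod.Lex.left _ _ (by simp)
  · simp only [List.map_cons, List.length_cons, List.length_map, List.headI]
    exact Prod.Lex.right _ (by
      have : row.dropLast.length = row.length - 1 := (List.length_dropLast (xs := row))
      have hpos : 0 < row.length := List.length_pos_iff.mpr hr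
      omega)

def Find_alt (alist : List (List Int)) (target : Int) : Option Int :=
  if alist = [] then none
  else some (FindAltGo (alist.map (fun row => row.take alist.headI.length)) target 0)
  -- row[:len(alist[0])] = row.take (first row's length); the bound is a Nat ≥ 0, so take is exact

-- ===== PRECONDITION & SPEC =====
-- Pre_ excludes matrices with a row SHORTER than the first row: whether A's staircase walk
-- reaches such a row with a column index past its end (raising IndexError) or inside it
-- (silently reading an element B's first-row-width view has already cut away) depends on the
-- walk itself, an accident of indexing by the first row's width on ragged input that no
-- caller of a 2D-matrix search would specify.
def Pre_Find (alist : List (List Int)) (target : Int) : Prop :=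
  ∀ row ∈ alist, alist.headI.length ≤ row.length
instance (alist : List (List Int)) (target : Int) : Decidable (Pre_Find alist target) := by unfold Pre_Find; infer_instance

def pvWitness_Find : List (List Int) × Int := ([[1, 3], [2, 4]], 3)

def Spec_Find (alist : List (List Int)) (target : Int) (out : Option Int) : Prop := out = Find_alt alist target
instance (alist : List (List Int)) (target : Int) (out : Option Int) : Decidable (Spec_Find alist target out) := by unfold Spec_Find; infer_instance

-- ===== CLAIM (what is proved, stated in full; the proofs are below) =====
def Claim_equal_Find : Prop := ∀ (alist : List (List Int)) (target : Int), Dom_Find alist target → Pre_Find alist target → Spec_Find alist target (Find alist target)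

-- ===== LEMMAS AND PROOFS =====

-- the submatrix B holds when A's walk is at state (i, j)
def SubM (alist : List (List Int)) (i j : Int) : List (List Int) :=
  (alist.drop i.toNat).map (fun r => r.take (j + 1).toNat)

-- the last element of l.take (k+1) is l[k]
theorem getLast_take_succ {alpha : Type} (l : List alpha) (k : Nat) (hk : k < l.length)
    (h : l.take (k + 1) ≠ []) : (l.take (k + 1)).getLast h = l[k] := by
  rw [List.getLast_eq_getElem]
  have hlen : (l.take (k + 1)).length = k + 1 := by rw [List.length_take]; omega
  simp only [hlen, Nat.add_sub_cancel]
  simp [List.getElem_take]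

theorem main_lemma (alist : List (List Int)) (target : Int)
    (hP : ∀ row ∈ alist, alist.headI.length ≤ row.length) :
    ∀ N : Nat, ∀ i j count : Int, 0 ≤ i → -1 ≤ j → j < (alist.headI.length : Int) →
      (((alist.length : Int) - i).toNat + (j + 1).toNat ≤ N) →
      FindAux alist target alist.length i j count
        = some (FindAltGo (SubM alist i j) target count) := by
  intro N
  induction N with
  | zero =>
    intro i j count h0 h1 h2 hm
    have hi : (alist.length : Int) ≤ i := by omega
    rw [FindAux]
    have hc : ¬ (i < (alist.length : Int) ∧ 0 ≤ j) := by omega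
    simp only [hc, dif_neg, not_false_iff]
    unfold SubM
    rw [List.drop_eq_nil_of_le (by omega)]
    simp [FindAltGo]
  | succ n ih =>
    intro i j count h0 h1 h2 hm
    by_cases hi : i < (alist.length : Int)
    · have hidx : i.toNat < alist.length := by omega
      have hdrop : alist.drop i.toNat = alist[i.toNat] :: alist.drop (i.toNat + 1) :=
        List.drop_eq_getElem_cons hidx
      have hrowlen : alist.headI.length ≤ (alist[i.toNat]).length :=
        hP _ (List.getElem_mem hidx)
      by_cases hjneg : j < 0
      · rw [FindAux]
        have hc : ¬ (i < (alist.length : Int) ∧ 0 ≤ j) := by omega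
        simp only [hc, dif_neg, not_false_iff]
        unfold SubM
        rw [hdrop]
        have hj0 : (j + 1).toNat = 0 := by omega
        simp only [List.map_cons, hj0, List.take_zero]
        rw [FindAltGo]
        simp
      · have hj : 0 ≤ j := by omega
        have hcond : i < (alist.length : Int) ∧ 0 ≤ j := ⟨hi, hj⟩
        have hjrow : j.toNat < (alist[i.toNat]).length := by omega
        have hj1 : (j + 1).toNat = j.toNat + 1 := by omega
        have hget : PySem.List.pyGet? alist i = some (alist[i.toNat]) := by
          rw [PySem.List.pyGet?_of_nonneg (xs := alist) (i := i) h0,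
              List.getElem?_eq_getElem hidx]
        have hgetv : PySem.List.pyGet? (alist[i.toNat]) j
            = some ((alist[i.toNat])[j.toNat]'hjrow) := by
          rw [PySem.List.pyGet?_of_nonneg (xs := alist[i.toNat]) (i := j) hj,
              List.getElem?_eq_getElem hjrow]
        have hrne : (alist[i.toNat]).take (j.toNat + 1) ≠ [] := by
          have : ((alist[i.toNat]).take (j.toNat + 1)).length = j.toNat + 1 := by
            rw [List.length_take]; omega
          intro hemp; rw [hemp] at this; simp at this
        have hsub : SubM alist i j
            = (alist[i.toNat]).take (j.toNat + 1)
              :: (alist.drop (i.toNat + 1)).map (fun r => r.take (j.toNat + 1)) := by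
          unfold SubM; rw [hdrop, hj1]; rfl
        have hlast : ∀ (h : (alist[i.toNat]).take (j.toNat + 1) ≠ []),
            ((alist[i.toNat]).take (j.toNat + 1)).getLast h = (alist[i.toNat])[j.toNat]'hjrow :=
          fun h => getLast_take_succ _ j.toNat hjrow h
        have hmapdl : (SubM alist i j).map List.dropLast = SubM alist i (j - 1) := by
          unfold SubM
          rw [List.map_map]
          apply List.map_congr_left
          intro r hr
          have hrlen : alist.headI.length ≤ r.length := hP _ (List.mem_of_mem_drop hr)
          simp only [Function.comp_apply]
          rw [List.dropLast_eq_take, List.length_take, List.take_take]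
          congr 1
          omega
        have hunf : FindAltGo (SubM alist i j) target count
            = if (alist[i.toNat])[j.toNat]'hjrow < target then
                FindAltGo ((alist.drop (i.toNat + 1)).map (fun r => r.take (j.toNat + 1))) target count
              else FindAltGo ((SubM alist i j).map List.dropLast) target
                (count + if (alist[i.toNat])[j.toNat]'hjrow = target then 1 else 0) := by
          rw [hsub, FindAltGo]
          simp only [hrne, dif_neg, not_false_iff, hlast]
        rw [FindAux, dif_pos hcond]
        simp only [hget, Option.bind_some, hgetv]
        by_cases hvlt : (alist[i.toNat])[j.toNat]'hjrow < target
        · rw [if_pos hvlt, hunf, if_pos hvlt]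
          have h1i : (i + 1).toNat = i.toNat + 1 := by omega
          rw [ih (i + 1) j count (by omega) h1 h2 (by omega)]
          unfold SubM
          rw [h1i, hj1]
        · rw [if_neg hvlt, hunf, if_neg hvlt, hmapdl]
          by_cases hvgt : (alist[i.toNat])[j.toNat]'hjrow > target
          · have hne : ¬ ((alist[i.toNat])[j.toNat]'hjrow = target) := by omega
            rw [if_pos hvgt, if_neg hne, add_zero]
            exact ih i (j - 1) count h0 (by omega) (by omega) (by omega)
          · have heq : (alist[i.toNat])[j.toNat]'hjrow = target := by omega
            rw [if_neg hvgt, if_pos heq]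
            exact ih i (j - 1) (count + 1) h0 (by omega) (by omega) (by omega)
    · rw [FindAux]
      have hc : ¬ (i < (alist.length : Int) ∧ 0 ≤ j) := by omega
      simp only [hc, dif_neg, not_false_iff]
      unfold SubM
      rw [List.drop_eq_nil_of_le (by omega)]
      simp [FindAltGo]

-- ===== VERDICT (by name: the statement is the Claim_ definition above) =====
theorem Find_spec : Claim_equal_Find := by
  intro alist target _hdom hpre
  unfold Spec_Find Find Find_alt
  by_cases h : alist = []
  · simp [h]
  · simp only [h, if_neg, not_false_iff]
    have hmain := main_lemma alist target hpre
      ((((alist.length : Int)) - 0).toNat + (((alist.headI.length : Int) - 1) + 1).toNat)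
      0 ((alist.headI.length : Int) - 1) 0 le_rfl (by omega) (by omega) le_rfl
    rw [hmain]
    have hid : SubM alist 0 ((alist.headI.length : Int) - 1)
        = alist.map (fun row => row.take alist.headI.length) := by
      unfold SubM
      simp only [Int.toNat_zero, List.drop_zero]
      have hc : ((alist.headI.length : Int) - 1 + 1).toNat = alist.headI.length := by omega
      rw [hc]
    rw [hid]
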